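-- pv_equiv track=rewrite | github.com/heemin88/algorithm | 프로그래머스/unrated/132265. 롤케이크 자르기/롤케이크 자르기.py | solution
-- ===== SOURCE A (Python) =====
-- def solution(topping):#input : 롤 케이크에 올라가 있는 토핑들의 번호
--     #동일한 가짓수의 토핑이 올라가면 공평하게 케이크가 나눠진 것.(조각크기, 토핑개수 상관 X)
--     answer = 0#롤케이크를 공평하게 자르는 방법의 수
--     a_dp= [1] #처음부터 가짓수를 세는 메모리제이션
--     b_dp=[1] # 끝에서부터 가짓수를 세는 메모리제이션
--     a= {} # 가짓수가 이전에 나왔는지 확인을 위한 배열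
--     b= {}
--
--     a[topping[0]]=1
--     b[topping[-1]]=1
--
--     for i in range(1,len(topping)): #처음부터 돌면서 가짓수를 dp에 저장
--         num = topping[i]
--         if a.get(num,0)==0:#앞에서 나오지 못한 토핑 종류라면 , 0이라면
--             a[num] = 1 #나왔음을 표시
--             a_dp.append(a_dp[-1]+1)
--         else:#나온적이 있다면
--             a_dp.append(a_dp[-1])#이전 값 저장
--
--     for i in range(len(topping)-2,-1,-1):#끝에서부터 오면서 토핑 가짓수
--         if b.get(topping[i],0)==0:#앞에서 나오지 못한 토핑 종류라면
--             b[topping[i]] = 1 #나왔음을 표시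
--             b_dp.append(b_dp[-1]+1)
--         else:
--             b_dp.append(b_dp[-1])
--     b_dp.reverse()
--
--     for i in range(len(topping)-1):
--         if a_dp[i]==b_dp[i+1]:
--             answer +=1
--     return answer
-- ===== SOURCE B (Python) =====
-- def solution(topping):
--     right = {}
--     for t in topping:
--         right[t] = right.get(t, 0) + 1
--     left = set()
--     answer = 0
--     for t in topping[:-1]:
--         left.add(t)
--         right[t] -= 1
--         if right[t] == 0:
--             del right[t]
--         if len(left) == len(right):
--             answer += 1
--     return answer
-- ===== Notes on version B (the rewrite author's own statement) =====
-- stated objective: idiomatic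
-- what changed: Replaces the three passes (prefix DP array, suffix DP array built backwards then reversed, and a final comparison loop over the two arrays) by a single sweep that keeps a left set and a right counter of the remaining suffix, comparing their sizes at each cut.
import Mathlib
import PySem

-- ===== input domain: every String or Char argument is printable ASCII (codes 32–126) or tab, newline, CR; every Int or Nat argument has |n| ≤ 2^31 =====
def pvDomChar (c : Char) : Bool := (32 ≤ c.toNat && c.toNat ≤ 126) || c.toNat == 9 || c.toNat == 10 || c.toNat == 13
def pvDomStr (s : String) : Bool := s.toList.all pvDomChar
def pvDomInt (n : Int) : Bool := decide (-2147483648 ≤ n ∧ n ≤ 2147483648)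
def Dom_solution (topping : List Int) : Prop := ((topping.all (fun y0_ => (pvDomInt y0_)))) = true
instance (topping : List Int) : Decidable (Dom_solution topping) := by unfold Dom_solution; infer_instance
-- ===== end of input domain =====

-- B replaces A's three passes (prefix DP array, backward suffix DP array + reverse, final
-- comparison loop) by one sweep maintaining a left set and a right counter (objective: idiomatic).

-- ===== PORT A =====
-- body of both of A's DP loops (identical in the Python up to the 'num' binding)
def fstepA (st : PySem.Dict Int Int × List Int) (num : Int) : PySem.Dict Int Int × List Int :=
  if PySem.Dict.getD st.1 num 0 = 0 then
    (PySem.Dict.insert st.1 num 1, st.2 ++ [PySem.List.pyGetD st.2 (-1) 0 + 1])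
  else
    (st.1, st.2 ++ [PySem.List.pyGetD st.2 (-1) 0])

def solution (topping : List Int) : Int :=
  let a : PySem.Dict Int Int := PySem.Dict.insert PySem.Dict.empty (PySem.List.pyGetD topping 0 0) 1
  let b : PySem.Dict Int Int := PySem.Dict.insert PySem.Dict.empty (PySem.List.pyGetD topping (-1) 0) 1
  let fwd := (PySem.List.pyRange 1 (topping.length : Int) 1).foldl
    (fun st i => fstepA st (PySem.List.pyGetD topping i 0)) (a, [1])
  let aDp := fwd.2
  let bwd := (PySem.List.pyRange ((topping.length : Int) - 2) (-1) (-1)).foldl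
    (fun st i => fstepA st (PySem.List.pyGetD topping i 0)) (b, [1])
  let bDp := bwd.2.reverse
  (PySem.List.pyRange 0 ((topping.length : Int) - 1) 1).foldl
    (fun answer i =>
      if PySem.List.pyGetD aDp i 0 = PySem.List.pyGetD bDp (i + 1) 0 then answer + 1 else answer)
    0

-- ===== PORT B =====
-- body of B's single sweep; 'right[t] -= 1' is Dict.modify (t is always a present key here)
def bstepB (st : PySem.Set Int × PySem.Dict Int Int × Int) (t : Int) :
    PySem.Set Int × PySem.Dict Int Int × Int :=
  let left := PySem.Set.add st.1 t
  let r := PySem.Dict.modify st.2.1 t 0 (· - 1)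
  let r := if PySem.Dict.getD r t 0 = 0 then PySem.Dict.erase r t else r
  let answer := if left.length = r.size then st.2.2 + 1 else st.2.2
  (left, r, answer)

def solution_alt (topping : List Int) : Int :=
  let right : PySem.Dict Int Int :=
    topping.foldl (fun d t => PySem.Dict.insert d t (PySem.Dict.getD d t 0 + 1)) PySem.Dict.empty
  let st := (PySem.List.slice topping none (some (-1))).foldl bstepB
    (PySem.Set.empty, right, 0)
  st.2.2

-- ===== PRECONDITION & SPEC =====
-- Pre_ excludes only the empty list, on which A raises IndexError (it indexes topping[0]).
def Pre_solution (topping : List Int) : Prop := topping ≠ []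
instance (topping : List Int) : Decidable (Pre_solution topping) := by unfold Pre_solution; infer_instance
def pvWitness_solution : List Int := [1, 2, 1, 2]

def Spec_solution (topping : List Int) (out : Int) : Prop := out = solution_alt topping
instance (topping : List Int) (out : Int) : Decidable (Spec_solution topping out) := by unfold Spec_solution; infer_instance

-- ===== CLAIM (what is proved, stated in full; the proofs are below) =====
def Claim_equal_solution : Prop := ∀ (topping : List Int), Dom_solution topping → Pre_solution topping → Spec_solution topping (solution topping)

-- ===== LEMMAS AND PROOFS =====

-- number of distinct toppings in a list
def dcard (l : List Int) : Nat := l.toFinset.card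

-- the common reference value: cuts 1 .. n-1, equally many distinct kinds on both sides
def refC (l : List Int) : Nat :=
  (List.range (l.length - 1)).countP
    (fun j => decide (dcard (l.take (j + 1)) = dcard (l.drop (j + 1))))

-- A's dict update, as a function of the element
def dstep (d : PySem.Dict Int Int) (x : Int) : PySem.Dict Int Int :=
  if PySem.Dict.getD d x 0 = 0 then PySem.Dict.insert d x 1 else d

def dictOf (p : List Int) : PySem.Dict Int Int := p.foldl dstep PySem.Dict.empty

-- A's dp array after scanning p
def dpOf (p : List Int) : List Int :=
  (List.range p.length).map (fun j => (dcard (p.take (j + 1)) : Int))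

-- B's invariant: r holds exactly the multiplicities of the remaining suffix s
def InvB (r : PySem.Dict Int Int) (s : List Int) : Prop :=
  r.keys.Nodup ∧ (∀ t, r.getD t 0 = (s.count t : Int)) ∧ (∀ t, t ∈ r.keys ↔ t ∈ s)

lemma pyGetD_neg_one {l : List Int} (d : Int) (h : l ≠ []) :
    PySem.List.pyGetD l (-1) d = l.getLast h := by
  have hl : 0 < l.length := List.length_pos_iff.2 h
  simp [PySem.List.pyGetD, PySem.List.pyGet?, PySem.List.pyIdx?, hl,
    show -(l.length:Int) ≤ -1 by omega, List.getLast_eq_getElem]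
lemma dcard_append_singleton (p : List Int) (x : Int) :
    dcard (p ++ [x]) = dcard p + (if x ∈ p then 0 else 1) := by
  unfold dcard
  by_cases hx : x ∈ p
  · simp [hx, List.toFinset_append, Finset.insert_eq_self.2 (List.mem_toFinset.2 hx)]
  · simp [hx, List.toFinset_append]

lemma dictOf_append (p : List Int) (y : Int) : dictOf (p ++ [y]) = dstep (dictOf p) y := by
  unfold dictOf; rw [List.foldl_append]; rfl

lemma getD_dictOf (p : List Int) : ∀ (x : Int),
    (dictOf p).getD x 0 = if x ∈ p then 1 else 0 := by
  induction p using List.reverseRecOn with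
  | nil => intro x; simp [dictOf, PySem.Dict.getD_empty]
  | append_singleton p y ih =>
    intro x
    rw [dictOf_append]
    unfold dstep
    by_cases hy : y ∈ p
    · rw [if_neg (by rw [ih]; simp [hy])]
      rw [ih]
      by_cases hx : x ∈ p <;> simp [hx, List.mem_append]
      intro hxy; subst hxy; exact absurd hy hx
    · rw [if_pos (by rw [ih]; simp [hy])]
      rw [PySem.Dict.getD_insert]
      by_cases hxy : x = y
      · simp [hxy]
      · rw [if_neg hxy, ih]
        by_cases hx : x ∈ p <;> simp [hx, hxy]

lemma dpOf_append (p : List Int) (x : Int) :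
    dpOf (p ++ [x]) = dpOf p ++ [(dcard (p ++ [x]) : Int)] := by
  unfold dpOf
  simp only [List.length_append, List.length_singleton, List.range_succ, List.map_append,
    List.map_cons, List.map_nil]
  congr 1
  · apply List.map_congr_left
    intro j hj
    simp at hj
    rw [List.take_append_of_le_length (by omega)]
  · rw [show p.length + 1 = (p ++ [x]).length by simp, List.take_length]

lemma dpOf_length (p : List Int) : (dpOf p).length = p.length := by simp [dpOf]

lemma dpOf_ne_nil {p : List Int} (h : p ≠ []) : dpOf p ≠ [] := by
  have := dpOf_length p
  intro hc
  rw [hc] at this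
  exact h (List.eq_nil_of_length_eq_zero this.symm)

lemma dpOf_last {p : List Int} (h : p ≠ []) :
    PySem.List.pyGetD (dpOf p) (-1) 0 = (dcard p : Int) := by
  have hp : 0 < p.length := List.length_pos_iff.2 h
  rw [pyGetD_neg_one 0 (dpOf_ne_nil h), List.getLast_eq_getElem]
  simp [dpOf]
  rw [Nat.sub_add_cancel hp, List.take_length]

lemma scanA (l : List Int) : ∀ (p : List Int), p ≠ [] →
    l.foldl fstepA (dictOf p, dpOf p) = (dictOf (p ++ l), dpOf (p ++ l)) := by
  induction l with
  | nil => intro p hp; simp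
  | cons x l ih =>
    intro p hp
    rw [List.foldl_cons]
    have hstep : fstepA (dictOf p, dpOf p) x = (dictOf (p ++ [x]), dpOf (p ++ [x])) := by
      unfold fstepA
      rw [dpOf_last hp]
      by_cases hx : x ∈ p
      · rw [if_neg (by rw [getD_dictOf]; simp [hx])]
        rw [dictOf_append]
        unfold dstep
        rw [if_neg (by rw [getD_dictOf]; simp [hx])]
        rw [dpOf_append, dcard_append_singleton]
        simp [hx]
      · rw [if_pos (by rw [getD_dictOf]; simp [hx])]
        rw [dictOf_append]
        unfold dstep
        rw [if_pos (by rw [getD_dictOf]; simp [hx])]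
        rw [dpOf_append, dcard_append_singleton]
        simp [hx]
    rw [hstep, ih (p ++ [x]) (by simp)]
    simp

lemma dpOf_get (p : List Int) (k : Nat) (hk : k < p.length) :
    PySem.List.pyGetD (dpOf p) (k : Int) 0 = (dcard (p.take (k + 1)) : Int) := by
  rw [PySem.List.pyGetD_eq_getElem (dpOf p) (i := ((k:Nat):Int)) 0 (by positivity)
    (by rw [dpOf_length]; exact_mod_cast hk)]
  simp [dpOf]

lemma map_pyGetD_range (xs : List Int) (m : Nat) (h : m ≤ xs.length) :
    (List.range m).map (fun k : Nat => PySem.List.pyGetD xs (k : Int) 0) = xs.take m := by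
  apply List.ext_getElem
  · simp [h]
  · intro i h1 h2
    simp only [List.length_map, List.length_range] at h1
    simp only [List.getElem_map, List.getElem_range]
    rw [PySem.List.pyGetD_eq_getElem xs (i := ((i:Nat):Int)) 0 (by positivity) (by omega)]
    simp [List.getElem_take]

lemma pyRange_down (m : Nat) :
    PySem.List.pyRange ((m : Int) - 1) (-1) (-1) = (PySem.List.pyRange 0 (m : Int) 1).reverse := by
  rcases Nat.eq_zero_or_pos m with hm | hm
  · subst hm; decide
  · rw [PySem.List.pyRange_zero_natCast]
    simp only [PySem.List.pyRange]
    rw [if_neg (by norm_num), if_neg (by norm_num), if_pos (by omega)]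
    have hc : ((((m:Int) - 1) - (-1) + -(-1) - 1) / -(-1)).toNat = m := by
      norm_num
    rw [hc]
    apply List.ext_getElem
    · simp
    · intro i h1 h2
      simp only [List.getElem_map, List.getElem_range, List.getElem_reverse]
      simp at h1
      simp
      omega

lemma bdp_get (topping : List Int) (i : Nat) (hi : i < topping.length) :
    PySem.List.pyGetD ((dpOf topping.reverse).reverse) (i : Int) 0
      = (dcard (topping.drop i) : Int) := by
  have hlen : ((dpOf topping.reverse).reverse).length = topping.length := by
    simp [dpOf_length]
  rw [PySem.List.pyGetD_eq_getElem _ (i := ((i:Nat):Int)) 0 (by positivity)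
    (by rw [hlen]; exact_mod_cast hi)]
  simp only [Int.toNat_natCast]
  rw [List.getElem_reverse]
  simp only [dpOf, List.getElem_map, List.getElem_range, List.length_map, List.length_range,
    List.length_reverse]
  have h1 : topping.length - 1 - i + 1 = topping.length - i := by omega
  rw [h1]
  congr 1
  rw [← List.reverse_drop]
  simp [dcard]

lemma solution_eq_refC (topping : List Int) (h : topping ≠ []) :
    solution topping = (refC topping : Int) := by
  have hn : 0 < topping.length := List.length_pos_iff.2 h
  unfold solution
  simp only []
  have hhd : PySem.List.pyGetD topping 0 0 = topping.head h := by
    rw [PySem.List.pyGetD_eq_getElem topping (i := (0:Int)) 0 le_rfl (by exact_mod_cast hn)]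
    simp [List.head_eq_getElem]
  have hlst : PySem.List.pyGetD topping (-1) 0 = topping.getLast h := pyGetD_neg_one 0 h
  have ha : PySem.Dict.insert PySem.Dict.empty (PySem.List.pyGetD topping 0 0) 1
      = dictOf [topping.head h] := by
    rw [hhd]; simp [dictOf, dstep, PySem.Dict.getD_empty]
  have hb : PySem.Dict.insert PySem.Dict.empty (PySem.List.pyGetD topping (-1) 0) 1
      = dictOf [topping.getLast h] := by
    rw [hlst]; simp [dictOf, dstep, PySem.Dict.getD_empty]
  have hdp1 : ∀ (x : Int), ([1] : List Int) = dpOf [x] := by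
    intro x; simp [dpOf, dcard]
  -- forward loop
  have hfwd : (PySem.List.pyRange 1 (topping.length : Int) 1).foldl
      (fun st i => fstepA st (PySem.List.pyGetD topping i 0))
      (dictOf [topping.head h], [1])
      = (dictOf topping, dpOf topping) := by
    rw [hdp1 (topping.head h)]
    rw [PySem.List.foldl_pyRange_pyGetD' topping 0 fstepA _ (by norm_num : (0:Int) ≤ 1)]
    rw [scanA _ _ (by simp)]
    rw [show ([topping.head h] ++ List.drop (1:Int).toNat topping) = topping by
      cases topping with
      | nil => exact absurd rfl h
      | cons a t => simp]
  -- backward loop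
  have hm1 : ((topping.length : Int) - 2) = (((topping.length - 1 : Nat)):Int) - 1 := by omega
  have hbwd : (PySem.List.pyRange ((topping.length : Int) - 2) (-1) (-1)).foldl
      (fun st i => fstepA st (PySem.List.pyGetD topping i 0))
      (dictOf [topping.getLast h], [1])
      = (dictOf topping.reverse, dpOf topping.reverse) := by
    rw [hdp1 (topping.getLast h)]
    rw [hm1, pyRange_down, PySem.List.pyRange_zero_natCast]
    rw [← List.map_reverse, List.foldl_map]
    rw [← List.foldl_map (f := fun k : Nat => PySem.List.pyGetD topping (k : Int) 0) (g := fstepA)]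
    rw [List.map_reverse]
    rw [map_pyGetD_range topping (topping.length - 1) (by omega)]
    rw [← List.dropLast_eq_take]
    rw [scanA _ _ (by simp)]
    rw [show ([topping.getLast h] ++ topping.dropLast.reverse) = topping.reverse by
      conv_rhs => rw [← List.dropLast_append_getLast h]
      simp]
  rw [ha, hb, hfwd, hbwd]
  -- final loop
  rw [show ((topping.length : Int) - 1) = ((topping.length - 1 : Nat) : Int) by omega,
    PySem.List.pyRange_zero_natCast, List.foldl_map]
  rw [PySem.List.foldl_congr_mem _ _
    (fun (ans : Int) (k : Nat) =>
      if (decide (dcard (topping.take (k+1)) = dcard (topping.drop (k+1))) = true)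
      then ans + 1 else ans) _
    (by
      intro acc k hk
      simp only [List.mem_range] at hk
      rw [dpOf_get topping k (by omega)]
      rw [show ((k : Int) + 1) = ((k + 1 : Nat) : Int) by push_cast; ring]
      rw [bdp_get topping (k+1) (by omega)]
      simp [Nat.cast_inj])]
  rw [PySem.List.foldl_count_if]
  simp [refC]

lemma length_eq_dcard_of_nodup {l s : List Int} (hn : l.Nodup) (hm : ∀ t, t ∈ l ↔ t ∈ s) :
    l.length = dcard s := by
  have hperm : l.Perm s.dedup :=
    (List.perm_ext_iff_of_nodup hn s.nodup_dedup).2 (fun a => by simp [hm a, List.mem_dedup])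
  simpa [dcard, List.card_toFinset] using hperm.length_eq
lemma ofList_length (l : List Int) : (PySem.Set.ofList l).length = dcard l :=
  length_eq_dcard_of_nodup (PySem.Set.nodup_ofList l) (fun t => PySem.Set.mem_ofList l t)

-- erase facts (PySem.Dict.erase filters the items list)
lemma get?_erase_of_ne (d : PySem.Dict Int Int) (k t : Int) (h : t ≠ k) :
    (d.erase k).get? t = d.get? t := by
  show Option.map _ (List.find? _ (d.items.filter _)) = Option.map _ (List.find? _ d.items)
  congr 1
  induction d.items with
  | nil => simp
  | cons p l ih =>
    by_cases hk : p.1 = k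
    · have ht : (p.1 == t) = false := by simp [hk]; exact fun e => absurd e.symm h
      have hkt : (k == t) = false := by simp; exact fun e => h e.symm
      simp [hk, ih, hkt]
    · simp only [List.filter_cons]
      rw [if_pos (by simp [hk])]
      by_cases htp : p.1 = t
      · simp [htp]
      · simp [htp, ih]

lemma getD_erase_of_ne (d : PySem.Dict Int Int) (k t : Int) (h : t ≠ k) :
    (d.erase k).getD t 0 = d.getD t 0 := by
  show ((d.erase k).get? t).getD 0 = (d.get? t).getD 0
  rw [get?_erase_of_ne d k t h]

lemma getD_erase_self (d : PySem.Dict Int Int) (k : Int) :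
    (d.erase k).getD k 0 = 0 := by
  show (Option.map _ (List.find? _ (d.items.filter _))).getD 0 = 0
  rw [List.find?_eq_none.2 (by
    intro p hp
    simp only [List.mem_filter] at hp
    simpa using hp.2)]
  rfl

lemma mem_keys_erase (d : PySem.Dict Int Int) (k t : Int) :
    t ∈ (d.erase k).keys ↔ t ∈ d.keys ∧ t ≠ k := by
  show t ∈ (d.items.filter _).map Prod.fst ↔ t ∈ d.items.map Prod.fst ∧ t ≠ k
  simp only [List.mem_map, List.mem_filter]
  constructor
  · rintro ⟨p, ⟨hp, hne⟩, rfl⟩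
    exact ⟨⟨p, hp, rfl⟩, by simpa using hne⟩
  · rintro ⟨⟨p, hp, rfl⟩, hne⟩
    exact ⟨p, ⟨hp, by simpa using hne⟩, rfl⟩

lemma nodup_keys_erase (d : PySem.Dict Int Int) (k : Int) (h : d.keys.Nodup) :
    (d.erase k).keys.Nodup := by
  show ((d.items.filter _).map Prod.fst).Nodup
  exact h.sublist (List.Sublist.map Prod.fst List.filter_sublist)

lemma size_eq_keys_length (d : PySem.Dict Int Int) : d.size = d.keys.length := by
  show d.items.length = (d.items.map Prod.fst).length
  simp

lemma size_of_InvB {r : PySem.Dict Int Int} {s : List Int} (h : InvB r s) :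
    r.size = dcard s := by
  rw [size_eq_keys_length]
  exact length_eq_dcard_of_nodup h.1 h.2.2

lemma InvB_step {r : PySem.Dict Int Int} {x : Int} {m : List Int} (h : InvB r (x :: m)) :
    InvB (let r1 := PySem.Dict.modify r x 0 (· - 1);
          if PySem.Dict.getD r1 x 0 = 0 then PySem.Dict.erase r1 x else r1) m := by
  obtain ⟨hnd, hcnt, hmem⟩ := h
  set r1 := PySem.Dict.modify r x 0 (· - 1) with hr1
  have hnd1 : r1.keys.Nodup := by
    rw [hr1, PySem.Dict.keys_modify]
    exact PySem.Dict.nodup_keys_insert _ _ _ hnd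
  have hcnt1 : ∀ t, r1.getD t 0 = (m.count t : Int) ∨ (t ≠ x ∧ r1.getD t 0 = ((x::m).count t : Int)) := by
    intro t
    rw [hr1, PySem.Dict.getD_modify]
    by_cases ht : t = x
    · left; subst ht; rw [hcnt t]; simp
    · right; exact ⟨ht, by rw [if_neg ht]; exact hcnt t⟩
  have hcnt1x : r1.getD x 0 = (m.count x : Int) := by
    rcases hcnt1 x with h1 | h1
    · exact h1
    · exact absurd rfl h1.1
  have hcnt1ne : ∀ t, t ≠ x → r1.getD t 0 = (m.count t : Int) := by
    intro t ht
    rw [hr1, PySem.Dict.getD_modify, if_neg ht, hcnt t]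
    simp [Ne.symm ht]
  have hmem1 : ∀ t, t ∈ r1.keys ↔ (t = x ∨ t ∈ (x :: m)) := by
    intro t
    rw [hr1, PySem.Dict.keys_modify, PySem.Dict.mem_keys_insert, hmem t]
  simp only []
  by_cases hz : PySem.Dict.getD r1 x 0 = 0
  · rw [if_pos hz]
    have hxm : x ∉ m := by
      intro hx
      rw [hcnt1x] at hz
      have := List.count_pos_iff.2 hx
      omega
    refine ⟨nodup_keys_erase _ _ hnd1, ?_, ?_⟩
    · intro t
      by_cases ht : t = x
      · subst ht
        rw [getD_erase_self]
        simp [List.count_eq_zero_of_not_mem hxm]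
      · rw [getD_erase_of_ne _ _ _ ht]
        exact hcnt1ne t ht
    · intro t
      rw [mem_keys_erase, hmem1 t]
      constructor
      · rintro ⟨h1 | h1, hne⟩
        · exact absurd h1 hne
        · rcases List.mem_cons.1 h1 with h2 | h2
          · exact absurd h2 hne
          · exact h2
      · intro hm2
        exact ⟨Or.inr (List.mem_cons_of_mem _ hm2), fun e => hxm (e ▸ hm2)⟩
  · rw [if_neg hz]
    have hxm : x ∈ m := by
      rw [hcnt1x] at hz
      by_contra hx
      rw [List.count_eq_zero_of_not_mem hx] at hz
      simp at hz
    refine ⟨hnd1, ?_, ?_⟩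
    · intro t
      by_cases ht : t = x
      · subst ht; exact hcnt1x
      · exact hcnt1ne t ht
    · intro t
      rw [hmem1 t]
      constructor
      · rintro (h1 | h1)
        · exact h1 ▸ hxm
        · rcases List.mem_cons.1 h1 with h2 | h2
          · exact h2 ▸ hxm
          · exact h2
      · intro hm2; exact Or.inr (List.mem_cons_of_mem _ hm2)

lemma scanB (l : List Int) : ∀ (p q : List Int) (r : PySem.Dict Int Int) (acc : Int),
    InvB r (l ++ q) →
    (l.foldl bstepB (PySem.Set.ofList p, r, acc)).2.2
      = acc + ((List.range l.length).countP
          (fun j => decide (dcard (p ++ l.take (j + 1)) = dcard (l.drop (j + 1) ++ q))) : Int) := by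
  induction l with
  | nil => intro p q r acc _; simp
  | cons x l ih =>
    intro p q r acc hinv
    rw [List.foldl_cons]
    have hstep : bstepB (PySem.Set.ofList p, r, acc) x
        = (PySem.Set.ofList (p ++ [x]),
           (let r1 := PySem.Dict.modify r x 0 (· - 1);
            if PySem.Dict.getD r1 x 0 = 0 then PySem.Dict.erase r1 x else r1),
           if dcard (p ++ [x]) = dcard (l ++ q) then acc + 1 else acc) := by
      unfold bstepB
      simp only [PySem.Set.ofList_append_singleton]
      congr 1
      congr 1
      have hinv' : InvB (let r1 := PySem.Dict.modify r x 0 (· - 1);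
          if PySem.Dict.getD r1 x 0 = 0 then PySem.Dict.erase r1 x else r1) (l ++ q) :=
        InvB_step (by simpa using hinv)
      rw [size_of_InvB hinv']
      rw [show ((PySem.Set.ofList p).add x).length = (PySem.Set.ofList (p ++ [x])).length by
        rw [PySem.Set.ofList_append_singleton]]
      rw [ofList_length]
    rw [hstep]
    have hinv2 : InvB (let r1 := PySem.Dict.modify r x 0 (· - 1);
        if PySem.Dict.getD r1 x 0 = 0 then PySem.Dict.erase r1 x else r1) (l ++ q) :=
      InvB_step (by simpa using hinv)
    rw [ih (p ++ [x]) q _ _ hinv2]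
    have hcount : (List.range (x :: l).length).countP
        (fun j => decide (dcard (p ++ (x :: l).take (j + 1)) = dcard ((x :: l).drop (j + 1) ++ q)))
        = (if dcard (p ++ [x]) = dcard (l ++ q) then 1 else 0)
          + (List.range l.length).countP
            (fun j => decide (dcard ((p ++ [x]) ++ l.take (j + 1)) = dcard (l.drop (j + 1) ++ q))) := by
      rw [List.length_cons, List.range_succ_eq_map, List.countP_cons, List.countP_map]
      rw [List.countP_congr (l := List.range l.length)
        (p := (fun j => decide (dcard (p ++ (x :: l).take (j + 1)) = dcard ((x :: l).drop (j + 1) ++ q))) ∘ Nat.succ)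
        (q := fun j => decide (dcard ((p ++ [x]) ++ l.take (j + 1)) = dcard (l.drop (j + 1) ++ q)))
        (by
          intro j _
          simp only [Function.comp_apply, List.take_succ_cons, List.drop_succ_cons,
            decide_eq_true_eq]
          rw [List.append_assoc]
          simp)]
      simp only [List.take_succ_cons, List.take_zero, List.drop_succ_cons, List.drop_zero,
        decide_eq_true_eq]
      by_cases hc : dcard (p ++ [x]) = dcard (l ++ q) <;> simp [hc] <;> omega
    rw [hcount]
    by_cases hc : dcard (p ++ [x]) = dcard (l ++ q) <;> simp [hc] <;> ring

lemma solution_alt_eq_refC (topping : List Int) (h : topping ≠ []) :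
    solution_alt topping = (refC topping : Int) := by
  unfold solution_alt
  simp only []
  rw [PySem.Dict.foldl_insert_getD_add_one_eq_counter, PySem.List.slice_to_neg_one]
  have hinv : InvB (PySem.Dict.counter topping) (topping.dropLast ++ [topping.getLast h]) := by
    rw [List.dropLast_append_getLast h]
    exact ⟨PySem.Dict.nodup_keys_counter topping,
      fun t => PySem.Dict.getD_counter topping t,
      fun t => by rw [PySem.Dict.keys_counter]; exact PySem.Set.mem_ofList topping t⟩
  have := scanB topping.dropLast [] [topping.getLast h] (PySem.Dict.counter topping) 0 hinv
  rw [show (PySem.Set.empty : PySem.Set Int) = PySem.Set.ofList [] from rfl]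
  rw [this]
  simp only [List.nil_append, List.length_dropLast]
  have hcong : (List.range (topping.length - 1)).countP
      (fun j => decide (dcard (topping.dropLast.take (j + 1))
        = dcard (topping.dropLast.drop (j + 1) ++ [topping.getLast h])))
      = refC topping := by
    unfold refC
    apply List.countP_congr
    intro j hj
    simp only [List.mem_range] at hj
    have h1 : topping.dropLast.take (j+1) = topping.take (j+1) := by
      rw [List.dropLast_eq_take, List.take_take]
      congr 1
      omega
    have h2 : topping.dropLast.drop (j+1) ++ [topping.getLast h] = topping.drop (j+1) := by
      conv_rhs => rw [← List.dropLast_append_getLast h]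
      rw [List.drop_append_of_le_length (by rw [List.length_dropLast]; omega)]
    rw [h1, h2]
  rw [zero_add]
  exact congrArg (fun k : Nat => (k : Int)) hcong

-- ===== VERDICT (by name: the statement is the Claim_ definition above) =====
theorem solution_spec : Claim_equal_solution := by
  intro topping _ hpre
  unfold Spec_solution
  rw [solution_eq_refC topping hpre, solution_alt_eq_refC topping hpre]
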